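-- pv_equiv track=rewrite | github.com/pietromagaldi/MC102 | lab06.py | multiplica_vetores
-- ===== SOURCE A (Python) =====
-- def multiplica_vetores(v1: list[int], v2: list[int]) -> list[int]:
--     """
--     Multiplica elemento a elemento de dois vetores
--     :param v1: vetor 1
--     :param v2: vetor 2
--     :return: vetor resultante
--     """
--     v3 = []
--     for i in range(max(len(v1), len(v2))):
--         try:
--             v3.append(v1[i] * v2[i])
--         except IndexError:
--             try:
--                 v3.append(v1[i])
--             except IndexError:
--                 v3.append(v2[i])
--     return v3
-- ===== SOURCE B (Python) =====
-- def multiplica_vetores(v1: list[int], v2: list[int]) -> list[int]: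
--     n = min(len(v1), len(v2))
--     res = [x * y for x, y in zip(v1, v2)]
--     res.extend(v1[n:] if len(v1) > len(v2) else v2[n:])
--     return res
-- ===== Notes on version B (the rewrite author's own statement) =====
-- stated objective: simpler
-- what changed: Replaces the index loop with nested try/except IndexError tail detection by a zip comprehension for the common prefix plus one explicit tail slice of the longer vector.
import Mathlib
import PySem

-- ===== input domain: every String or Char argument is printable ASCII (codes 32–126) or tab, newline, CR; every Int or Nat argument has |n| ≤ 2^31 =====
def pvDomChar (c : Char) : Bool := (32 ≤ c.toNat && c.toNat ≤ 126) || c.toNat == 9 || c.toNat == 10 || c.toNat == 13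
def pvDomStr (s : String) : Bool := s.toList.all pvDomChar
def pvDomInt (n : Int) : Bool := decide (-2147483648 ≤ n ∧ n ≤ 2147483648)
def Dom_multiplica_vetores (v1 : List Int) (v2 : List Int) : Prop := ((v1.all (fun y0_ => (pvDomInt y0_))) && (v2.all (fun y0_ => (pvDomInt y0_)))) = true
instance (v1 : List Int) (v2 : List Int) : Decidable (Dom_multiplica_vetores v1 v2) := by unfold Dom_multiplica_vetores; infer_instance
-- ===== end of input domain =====

-- B replaces A's index loop with nested try/except tail detection by a zip
-- comprehension for the common prefix plus one explicit tail slice (simpler; same cost).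

-- ===== PORT A =====
-- for i in range(max(len(v1), len(v2))): try v1[i]*v2[i]; except: try v1[i]; except: v2[i]
def multiplica_vetores (v1 : List Int) (v2 : List Int) : List Int :=
  (PySem.List.pyRange 0 ((max v1.length v2.length : Nat) : Int) 1).foldl
    (fun v3 i =>
      match PySem.List.pyGet? v1 i, PySem.List.pyGet? v2 i with
      | some a, some b => v3 ++ [a * b]          -- v3.append(v1[i] * v2[i])
      | some a, none   => v3 ++ [a]              -- IndexError on v2[i]: v3.append(v1[i])
      | none,   some b => v3 ++ [b]              -- IndexError on v1[i]: v3.append(v2[i])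
      | none,   none   => v3)                    -- unreachable for i < max(len, len)
    []

-- ===== PORT B =====
def multiplica_vetores_alt (v1 : List Int) (v2 : List Int) : List Int :=
  let n : Int := min (v1.length : Int) (v2.length : Int)
  let res := (v1.zip v2).map (fun p => p.1 * p.2)
  res ++ (if v1.length > v2.length
            then PySem.List.slice v1 (some n) none    -- v1[n:]
            else PySem.List.slice v2 (some n) none)   -- v2[n:]

-- ===== PRECONDITION & SPEC =====
def Spec_multiplica_vetores (v1 : List Int) (v2 : List Int) (out : List Int) : Prop := out = multiplica_vetores_alt v1 v2
instance (v1 : List Int) (v2 : List Int) (out : List Int) : Decidable (Spec_multiplica_vetores v1 v2 out) := by unfold Spec_multiplica_vetores; infer_instance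

-- ===== CLAIM (what is proved, stated in full; the proofs are below) =====
def Claim_equal_multiplica_vetores : Prop := ∀ (v1 : List Int) (v2 : List Int), Dom_multiplica_vetores v1 v2 → Spec_multiplica_vetores v1 v2 (multiplica_vetores v1 v2)

-- ===== LEMMAS AND PROOFS =====

-- the body of A's loop, as the (0- or 1-element) list appended at index k
def pvStep (v1 v2 : List Int) (k : Nat) : List Int :=
  match v1[k]?, v2[k]? with
  | some a, some b => [a * b]
  | some a, none   => [a]
  | none,   some b => [b]
  | none,   none   => []

lemma pvStep_cons_succ (a b : Int) (v1 v2 : List Int) (k : Nat) :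
    pvStep (a :: v1) (b :: v2) (k + 1) = pvStep v1 v2 k := by
  simp [pvStep]

-- A's foldl is a flatMap of pvStep over List.range
lemma multiplica_vetores_eq_flat (v1 v2 : List Int) :
    multiplica_vetores v1 v2 =
      (List.range (max v1.length v2.length)).flatMap (pvStep v1 v2) := by
  unfold multiplica_vetores
  rw [show (fun (v3 : List Int) (i : Int) =>
        match PySem.List.pyGet? v1 i, PySem.List.pyGet? v2 i with
        | some a, some b => v3 ++ [a * b]
        | some a, none   => v3 ++ [a]
        | none,   some b => v3 ++ [b]
        | none,   none   => v3) =
      (fun (v3 : List Int) (i : Int) => v3 ++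
        (match PySem.List.pyGet? v1 i, PySem.List.pyGet? v2 i with
        | some a, some b => [a * b]
        | some a, none   => [a]
        | none,   some b => [b]
        | none,   none   => ([] : List Int))) from by
      funext v3 i
      rcases PySem.List.pyGet? v1 i with _ | a <;> rcases PySem.List.pyGet? v2 i with _ | b <;> simp]
  rw [PySem.List.foldl_append_eq_flatMap]
  rw [PySem.List.pyRange_one]
  simp only [List.flatMap_map, List.nil_append]
  apply List.flatMap_congr
  intro k _
  simp [pvStep, PySem.List.pyGet?_natCast]

lemma flat_nil_left (v2 : List Int) :
    (List.range (max ([] : List Int).length v2.length)).flatMap (pvStep [] v2) = v2 := by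
  induction v2 with
  | nil => simp
  | cons b t ih =>
    simp only [List.length_nil, List.length_cons, Nat.max_eq_right (Nat.zero_le _)] at *
    rw [List.range_succ_eq_map]
    simp only [List.flatMap_cons, List.flatMap_map]
    have h1 : pvStep [] (b :: t) 0 = [b] := by simp [pvStep]
    have h2 : ∀ k, pvStep ([] : List Int) (b :: t) (k + 1) = pvStep [] t k := by
      intro k; simp [pvStep]
    rw [h1]
    simp only [h2]
    rw [show (List.range t.length).flatMap (fun k => pvStep [] t k) = t from ih]
    rfl

lemma flat_nil_right (v1 : List Int) :
    (List.range (max v1.length ([] : List Int).length)).flatMap (pvStep v1 []) = v1 := by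
  induction v1 with
  | nil => simp
  | cons a t ih =>
    simp only [List.length_nil, List.length_cons, Nat.max_eq_left (Nat.zero_le _)] at *
    rw [List.range_succ_eq_map]
    simp only [List.flatMap_cons, List.flatMap_map]
    have h1 : pvStep (a :: t) [] 0 = [a] := by simp [pvStep]
    have h2 : ∀ k, pvStep (a :: t) ([] : List Int) (k + 1) = pvStep t [] k := by
      intro k; simp [pvStep]
    rw [h1]
    simp only [h2]
    rw [show (List.range t.length).flatMap (fun k => pvStep t [] k) = t from ih]
    rfl

lemma alt_eq_drop (v1 v2 : List Int) :
    multiplica_vetores_alt v1 v2 =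
      (v1.zip v2).map (fun p => p.1 * p.2) ++
        (if v2.length < v1.length
          then v1.drop (min v1.length v2.length)
          else v2.drop (min v1.length v2.length)) := by
  simp only [multiplica_vetores_alt]
  rw [show min ((v1.length : Int)) ((v2.length : Int)) = ((min v1.length v2.length : Nat) : Int) from by push_cast; ring]
  rw [PySem.List.slice_from_natCast, PySem.List.slice_from_natCast]

lemma alt_nil_left (v2 : List Int) : multiplica_vetores_alt [] v2 = v2 := by
  rw [alt_eq_drop]; simp

lemma alt_nil_right (v1 : List Int) : multiplica_vetores_alt v1 [] = v1 := by
  rw [alt_eq_drop]; cases v1 <;> simp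

lemma alt_cons (a b : Int) (v1 v2 : List Int) :
    multiplica_vetores_alt (a :: v1) (b :: v2) = a * b :: multiplica_vetores_alt v1 v2 := by
  rw [alt_eq_drop, alt_eq_drop]
  simp only [List.zip_cons_cons, List.map_cons, List.length_cons]
  rw [show min (v1.length + 1) (v2.length + 1) = min v1.length v2.length + 1 from by omega]
  by_cases h : v2.length < v1.length
  · rw [if_pos h, if_pos (by omega : v2.length + 1 < v1.length + 1)]
    simp [List.drop_succ_cons]
  · rw [if_neg h, if_neg (by omega : ¬ v2.length + 1 < v1.length + 1)]
    simp [List.drop_succ_cons]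

lemma flat_eq_alt (v1 v2 : List Int) :
    (List.range (max v1.length v2.length)).flatMap (pvStep v1 v2) = multiplica_vetores_alt v1 v2 := by
  induction v1 generalizing v2 with
  | nil => rw [flat_nil_left, alt_nil_left]
  | cons a t ih =>
    cases v2 with
    | nil => rw [flat_nil_right, alt_nil_right]
    | cons b u =>
      rw [alt_cons]
      simp only [List.length_cons]
      rw [show max (t.length + 1) (u.length + 1) = max t.length u.length + 1 from by omega]
      rw [List.range_succ_eq_map]
      simp only [List.flatMap_cons, List.flatMap_map]
      have h1 : pvStep (a :: t) (b :: u) 0 = [a * b] := by simp [pvStep]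
      rw [h1]
      simp only [pvStep_cons_succ]
      rw [show (List.range (max t.length u.length)).flatMap (fun k => pvStep t u k)
            = multiplica_vetores_alt t u from ih u]
      rfl

-- ===== VERDICT (by name: the statement is the Claim_ definition above) =====
theorem multiplica_vetores_spec : Claim_equal_multiplica_vetores := by
  intro v1 v2 _
  unfold Spec_multiplica_vetores
  rw [multiplica_vetores_eq_flat, flat_eq_alt]
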